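-- pv_equiv track=rewrite | github.com/gadihh/DNAStoralator | dnaSimulator/solqc/src/analyzers/error_statistics/cummulative_error_analyzer_new.py | get_count_error
-- ===== SOURCE A (Python) =====
-- def get_count_error(path):
--     counter = 0
--     #if float('-inf') < float(path) < float('inf'):
--     if True:
--         for index, letter in enumerate(path):
--             if letter not in {'0', '1', '2', '3'}:
--                 break
--             if letter != '0':
--                 if letter == '1':
--                     if index-1 >= 0 and str(path)[index-1] != '1':
--                         counter+=1
--                     #while index+1 < len(str(path)) and str(path)[index+1] == '1':
--                     #    index+=1
--                     #counter+=1
--                 else: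
--                     counter+=1
--                     #while index + 1 < len(str(path)) and str(path)[index + 1] == '1':
--                     #    index += 1
--                     #counter+=1
--
--     return counter
-- ===== SOURCE B (Python) =====
-- from itertools import takewhile, groupby
--
-- def get_count_error(path):
--     prefix = takewhile(lambda c: c in {'0', '1', '2', '3'}, path)
--     counter = 0
--     for gi, (key, grp) in enumerate(groupby(prefix)):
--         if key in ('2', '3'):
--             counter += sum(1 for _ in grp)
--         elif key == '1' and gi != 0:
--             counter += 1
--     return counter
-- ===== Notes on version B (the rewrite author's own statement) =====
-- stated objective: alternative
-- what changed: Replaces A's indexed character scan (which re-reads path[index-1] to detect where a run of 1s starts) with itertools.takewhile to cut the valid prefix and itertools.groupby over maximal runs, adding the run length for '2'/'3' runs and 1 for each non-leading '1' run.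
import Mathlib
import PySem

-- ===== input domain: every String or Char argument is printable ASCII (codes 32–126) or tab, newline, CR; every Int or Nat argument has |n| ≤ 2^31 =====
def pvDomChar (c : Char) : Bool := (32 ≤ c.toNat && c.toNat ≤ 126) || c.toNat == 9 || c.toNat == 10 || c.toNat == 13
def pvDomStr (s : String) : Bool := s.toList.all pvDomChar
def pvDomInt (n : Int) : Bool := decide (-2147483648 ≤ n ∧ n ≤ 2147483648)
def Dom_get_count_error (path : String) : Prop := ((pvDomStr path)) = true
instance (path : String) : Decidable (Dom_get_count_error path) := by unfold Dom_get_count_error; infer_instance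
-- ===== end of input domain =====

-- B replaces A's indexed scan (which re-reads the previous character via path[index-1])
-- with takewhile + groupby over maximal runs; objective: alternative decomposition, same cost.

-- ===== PORT A =====
-- the for-loop with its `break`, over enumerate(path); counter is the accumulator
def pvAgo (s : List Char) : List (Int × Char) → Int → Int
  | [], counter => counter
  | (index, letter) :: rest, counter =>
    if letter ∉ ['0', '1', '2', '3'] then counter
    else
      pvAgo s rest
        (if letter ≠ '0' then
          if letter = '1' then
            (if 0 ≤ index - 1 ∧ PySem.List.pyGet? s (index - 1) ≠ some '1'
             then counter + 1 else counter)
          else counter + 1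
        else counter)

def get_count_error (path : String) : Int :=
  pvAgo path.toList (PySem.List.enumerate path.toList) 0

-- ===== PORT B =====
-- itertools.groupby: the list of (key, run length) of maximal runs
def pvBrunsAux (k : Char) (n : Int) : List Char → List (Char × Int)
  | [] => [(k, n)]
  | c :: rest => if c = k then pvBrunsAux k (n + 1) rest else (k, n) :: pvBrunsAux c 1 rest

def pvBruns : List Char → List (Char × Int)
  | [] => []
  | c :: rest => pvBrunsAux c 1 rest

-- the for-loop over enumerate(groupby(prefix))
def pvBtally : List (Char × Int) → Nat → Int
  | [], _ => 0
  | (key, n) :: rest, gi =>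
    (if key = '2' ∨ key = '3' then n
     else if key = '1' ∧ gi ≠ 0 then 1 else 0) + pvBtally rest (gi + 1)

def get_count_error_alt (path : String) : Int :=
  pvBtally (pvBruns (path.toList.takeWhile (· ∈ ['0', '1', '2', '3']))) 0

-- ===== PRECONDITION & SPEC =====
def Spec_get_count_error (path : String) (out : Int) : Prop := out = get_count_error_alt path
instance (path : String) (out : Int) : Decidable (Spec_get_count_error path out) := by unfold Spec_get_count_error; infer_instance

-- ===== CLAIM (what is proved, stated in full; the proofs are below) =====
def Claim_equal_get_count_error : Prop := ∀ (path : String), Dom_get_count_error path → Spec_get_count_error path (get_count_error path)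

-- ===== LEMMAS AND PROOFS =====

-- common reference: one pass with the previous character as state ('1' is the
-- initial state, so a leading '1' is not counted, matching A's index-1 ≥ 0 test)
def pvCnt (prev : Char) : List Char → Int
  | [] => 0
  | c :: rest =>
    if c = '0' then pvCnt c rest
    else if c = '1' then (if prev ≠ '1' then 1 else 0) + pvCnt c rest
    else if c = '2' ∨ c = '3' then 1 + pvCnt c rest
    else 0

-- A-side: the loop from position i equals pvCnt with prev = char at i-1 ('1' at i = 0)
theorem pvAgo_eq_cnt (s : List Char) :
    ∀ (t : List Char) (i : Nat) (c : Int), s.drop i = t →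
      pvAgo s (PySem.List.enumerate t (i : Int)) c
        = c + pvCnt (if _ : i = 0 then '1' else s.getD (i - 1) '1') t := by
  intro t
  induction t with
  | nil => intro i c _; simp [PySem.List.enumerate_nil, pvAgo, pvCnt]
  | cons ch rest ih =>
    intro i c hdrop
    have hlen : i < s.length := by
      by_contra hle
      rw [List.drop_eq_nil_of_le (by omega)] at hdrop
      simp at hdrop
    have hget : s[i]? = some ch := by
      have h0 := congrArg (fun l => l[0]?) hdrop
      simpa [List.getElem?_drop] using h0
    have hdrop' : s.drop (i + 1) = rest := by
      rw [← List.tail_drop, hdrop, List.tail_cons]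
    have hcast : ((i : Int) + 1) = ((i + 1 : Nat) : Int) := by push_cast; ring
    have hprev : (if h : i + 1 = 0 then '1' else s.getD (i + 1 - 1) '1') = ch := by
      rw [dif_neg (Nat.succ_ne_zero i), Nat.add_sub_cancel,
        List.getD_eq_getElem?_getD, hget]
      rfl
    have hIH : ∀ c' : Int,
        pvAgo s (PySem.List.enumerate rest ((i : Int) + 1)) c' = c' + pvCnt ch rest := by
      intro c'; rw [hcast, ih (i + 1) c' hdrop', hprev]
    rw [PySem.List.enumerate_cons, pvAgo]
    by_cases hmem : ch ∈ ['0', '1', '2', '3']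
    · rw [if_neg (not_not_intro hmem)]
      simp only [List.mem_cons, List.not_mem_nil, or_false] at hmem
      rcases hmem with rfl | rfl | rfl | rfl
      · -- letter '0'
        rw [if_neg (by decide), hIH c]
        simp [pvCnt]
      · -- letter '1'
        rw [if_pos (by decide), if_pos rfl]
        rcases Nat.eq_zero_or_pos i with rfl | hi
        · rw [if_neg (by rintro ⟨h, -⟩; norm_num at h), hIH c]
          simp [pvCnt]
        · obtain ⟨j, rfl⟩ : ∃ j, i = j + 1 := ⟨i - 1, by omega⟩
          have hj : j < s.length := by omega
          have hcastj : ((j + 1 : Nat) : Int) - 1 = ((j : Nat) : Int) := by push_cast; ring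
          have hpg : PySem.List.pyGet? s (((j + 1 : Nat) : Int) - 1) = some (s[j]'hj) := by
            rw [hcastj, PySem.List.pyGet?_natCast, List.getElem?_eq_getElem hj]
          have hP : (if h : j + 1 = 0 then '1' else s.getD (j + 1 - 1) '1') = s[j]'hj := by
            rw [dif_neg (Nat.succ_ne_zero j), Nat.add_sub_cancel,
              List.getD_eq_getElem?_getD, List.getElem?_eq_getElem hj]
            rfl
          by_cases hp1 : s[j]'hj = '1'
          · rw [if_neg (by rintro ⟨-, hne⟩; exact hne (by rw [hpg, hp1])), hIH c]
            rw [hP]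
            simp [pvCnt, hp1]
          · rw [if_pos ⟨by push_cast; omega, by rw [hpg]; simpa using hp1⟩, hIH (c + 1)]
            rw [hP]
            simp [pvCnt, hp1]
            ring
      · -- letter '2'
        rw [if_pos (by decide), if_neg (by decide), hIH (c + 1)]
        simp [pvCnt]
        ring
      · -- letter '3'
        rw [if_pos (by decide), if_neg (by decide), hIH (c + 1)]
        simp [pvCnt]
        ring
    · rw [if_pos hmem]
      simp only [List.mem_cons, List.not_mem_nil, or_false, not_or] at hmem
      obtain ⟨h0, h1, h2, h3⟩ := hmem
      simp [pvCnt, h0, h1, h2, h3]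

-- pvCnt ignores everything from the first non-digit on
theorem pvCnt_takeWhile (prev : Char) (t : List Char) :
    pvCnt prev t = pvCnt prev (t.takeWhile (· ∈ ['0', '1', '2', '3'])) := by
  induction t generalizing prev with
  | nil => simp
  | cons c rest ih =>
    by_cases hc : c ∈ ['0', '1', '2', '3']
    · rw [List.takeWhile_cons_of_pos (by simpa using hc)]
      simp only [List.mem_cons, List.not_mem_nil, or_false] at hc
      rcases hc with rfl | rfl | rfl | rfl <;> simp [pvCnt, ih]
    · rw [List.takeWhile_cons_of_neg (by simpa using hc)]
      simp only [List.mem_cons, List.not_mem_nil, or_false, not_or] at hc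
      obtain ⟨h0, h1, h2, h3⟩ := hc
      simp [pvCnt, h0, h1, h2, h3]

-- B-side: tally over runs equals pvCnt, for all-digit lists
theorem pvBtally_runsAux (t : List Char) :
    ∀ (k : Char) (n : Nat) (gi : Nat), (∀ c ∈ t, c ∈ ['0', '1', '2', '3']) →
      pvBtally (pvBrunsAux k (n : Int) t) gi
        = (if k = '2' ∨ k = '3' then (n : Int) else if k = '1' ∧ gi ≠ 0 then 1 else 0)
          + pvCnt k t := by
  intro k n gi hd
  induction t generalizing k n gi with
  | nil => simp [pvBrunsAux, pvBtally, pvCnt]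
  | cons c rest ih =>
    have hc : c = '0' ∨ c = '1' ∨ c = '2' ∨ c = '3' := by
      simpa using hd c (List.mem_cons_self ..)
    have hrest : ∀ x ∈ rest, x ∈ ['0', '1', '2', '3'] :=
      fun x hx => hd x (List.mem_cons_of_mem _ hx)
    by_cases hck : c = k
    · rw [show pvBrunsAux k (n : Int) (c :: rest) = pvBrunsAux k ((n : Int) + 1) rest by
            simp [pvBrunsAux, hck],
        show ((n : Int) + 1) = ((n + 1 : Nat) : Int) by push_cast; ring,
        ih _ _ gi hrest]
      subst hck
      rcases hc with rfl | rfl | rfl | rfl <;> simp [pvCnt] <;> push_cast <;> try ring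
    · rw [show pvBrunsAux k (n : Int) (c :: rest)
            = (k, (n : Int)) :: pvBrunsAux c 1 rest by simp [pvBrunsAux, hck]]
      rw [pvBtally]
      rw [show (1 : Int) = ((1 : Nat) : Int) by norm_num, ih _ _ (gi + 1) hrest]
      have hck' : ¬ k = c := fun h => hck h.symm
      rcases hc with rfl | rfl | rfl | rfl <;>
        simp [pvCnt, hck']

theorem pvBtally_runs (p : List Char) (hp : ∀ c ∈ p, c ∈ ['0', '1', '2', '3']) :
    pvBtally (pvBruns p) 0 = pvCnt '1' p := by
  cases p with
  | nil => simp [pvBruns, pvBtally, pvCnt]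
  | cons c rest =>
    have hc : c = '0' ∨ c = '1' ∨ c = '2' ∨ c = '3' := by
      simpa using hp c (List.mem_cons_self ..)
    have hrest : ∀ x ∈ rest, x ∈ ['0', '1', '2', '3'] :=
      fun x hx => hp x (List.mem_cons_of_mem _ hx)
    rw [pvBruns, show (1 : Int) = ((1 : Nat) : Int) by norm_num,
      pvBtally_runsAux rest c 1 0 hrest]
    rcases hc with rfl | rfl | rfl | rfl <;> simp [pvCnt]

-- ===== VERDICT (by name: the statement is the Claim_ definition above) =====
theorem get_count_error_spec : Claim_equal_get_count_error := by
  intro path _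
  unfold Spec_get_count_error get_count_error get_count_error_alt
  rw [pvBtally_runs _ (fun c hc => by simpa using List.mem_takeWhile_imp hc), ← pvCnt_takeWhile]
  have := pvAgo_eq_cnt path.toList path.toList 0 0 rfl
  simpa using this
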